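-- pv_equiv track=rewrite | github.com/pranaytej157/smart-syllabus-skill-mapper | skill_mapper.py | map_skills_to_roles
-- ===== SOURCE A (Python) =====
-- def map_skills_to_roles(ai_skills, skill_taxonomy):
--     """Map extracted skills to roles. Case-insensitive matching."""
--     ai_skills_lower = {s.lower() for s in (ai_skills or [])}
--     mapping = {}
--     for role, skills in skill_taxonomy.items():
--         matched = [skill for skill in (skills or []) if skill.lower() in ai_skills_lower]
--         missing = [skill for skill in (skills or []) if skill.lower() not in ai_skills_lower]
--         mapping[role] = {"matched": matched, "missing": missing}
--     return mapping
-- ===== SOURCE B (Python) =====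
-- def map_skills_to_roles(ai_skills, skill_taxonomy):
--     """Map extracted skills to roles. Case-insensitive matching.
--
--     Flat classify-then-group: every (role, skill) pair is classified once into
--     two role-keyed grouping dicts, and the result is assembled per role by lookup.
--     """
--     ai_skills_lower = {s.lower() for s in (ai_skills or [])}
--     pairs = [(role, skill) for role, skills in skill_taxonomy.items()
--              for skill in (skills or [])]
--     matched_by_role = {}
--     missing_by_role = {}
--     for role, skill in pairs:
--         bucket = matched_by_role if skill.lower() in ai_skills_lower else missing_by_role
--         bucket.setdefault(role, []).append(skill)
--     return {role: {"matched": matched_by_role.get(role, []),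
--                    "missing": missing_by_role.get(role, [])}
--             for role in skill_taxonomy}
-- ===== Notes on version B (the rewrite author's own statement) =====
-- stated objective: alternative
-- what changed: Instead of A's per-role filtering scans, B flattens the taxonomy into (role, skill) pairs, classifies each pair once into two role-keyed grouping dicts (matched_by_role / missing_by_role) built with setdefault, and assembles the result per role by dict lookup.
import Mathlib
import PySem

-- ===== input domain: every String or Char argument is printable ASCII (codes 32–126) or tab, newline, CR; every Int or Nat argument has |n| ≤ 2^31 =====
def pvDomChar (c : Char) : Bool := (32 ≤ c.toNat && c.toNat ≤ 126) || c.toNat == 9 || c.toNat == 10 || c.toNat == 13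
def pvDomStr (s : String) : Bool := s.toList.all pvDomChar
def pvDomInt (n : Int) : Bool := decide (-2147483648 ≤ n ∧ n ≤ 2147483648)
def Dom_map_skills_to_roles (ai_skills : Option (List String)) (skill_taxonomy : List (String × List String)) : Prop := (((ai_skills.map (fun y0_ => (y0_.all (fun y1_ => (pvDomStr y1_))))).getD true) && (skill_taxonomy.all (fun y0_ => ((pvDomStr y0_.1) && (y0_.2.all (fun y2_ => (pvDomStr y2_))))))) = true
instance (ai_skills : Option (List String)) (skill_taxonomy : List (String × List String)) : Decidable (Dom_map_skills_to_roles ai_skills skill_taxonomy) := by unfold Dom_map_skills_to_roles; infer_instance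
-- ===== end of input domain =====

-- B replaces A's per-role filtering scans by a flat classify-then-group pass: every (role, skill)
-- pair is classified once into two role-keyed grouping dicts, then the output is assembled by lookup
-- (alternative decomposition, same cost).

-- ===== PORT A =====
-- literal port of A: lowercase set of ai skills, then per role two filtering comprehensions;
-- 'mapping[role] = …' over a dict's items appends a fresh key, hence the foldl-append.
def map_skills_to_roles (ai_skills : Option (List String)) (skill_taxonomy : List (String × List String)) : List (String × List (String × List String)) :=
  let ai_skills_lower : PySem.Set String := PySem.Set.ofList ((ai_skills.getD []).map (fun s => PySem.Str.lower s))
  skill_taxonomy.foldl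
    (fun mapping rs =>
      let matched := rs.2.filter (fun skill => PySem.Set.contains ai_skills_lower (PySem.Str.lower skill))
      let missing := rs.2.filter (fun skill => !PySem.Set.contains ai_skills_lower (PySem.Str.lower skill))
      mapping ++ [(rs.1, [("matched", matched), ("missing", missing)])])
    []

-- ===== PORT B =====
-- literal port of Source B: flat pair list, one classify loop into two grouping dicts
-- ('bucket.setdefault(role, []).append(skill)' is exactly 'Dict.modify role [] (· ++ [skill])'),
-- then assembly per role by lookup ('d.get(role, [])' = Dict.getD).
def map_skills_to_roles_alt (ai_skills : Option (List String)) (skill_taxonomy : List (String × List String)) : List (String × List (String × List String)) :=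
  let ai_skills_lower : PySem.Set String := PySem.Set.ofList ((ai_skills.getD []).map (fun s => PySem.Str.lower s))
  let pairs : List (String × String) := skill_taxonomy.flatMap (fun rs => rs.2.map (fun s => (rs.1, s)))
  let buckets : PySem.Dict String (List String) × PySem.Dict String (List String) :=
    pairs.foldl
      (fun st p =>
        if PySem.Set.contains ai_skills_lower (PySem.Str.lower p.2)
        then (st.1.modify p.1 [] (· ++ [p.2]), st.2)
        else (st.1, st.2.modify p.1 [] (· ++ [p.2])))
      (PySem.Dict.empty, PySem.Dict.empty)
  skill_taxonomy.map (fun rs =>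
    (rs.1, [("matched", buckets.1.getD rs.1 []), ("missing", buckets.2.getD rs.1 [])]))

-- ===== PRECONDITION & SPEC =====
-- Pre_ requires the role keys to be pairwise distinct: skill_taxonomy models a Python dict,
-- whose keys are distinct by construction, so no actual Python input is excluded.
def Pre_map_skills_to_roles (ai_skills : Option (List String)) (skill_taxonomy : List (String × List String)) : Prop :=
  (skill_taxonomy.map Prod.fst).Nodup
instance (ai_skills : Option (List String)) (skill_taxonomy : List (String × List String)) : Decidable (Pre_map_skills_to_roles ai_skills skill_taxonomy) := by unfold Pre_map_skills_to_roles; infer_instance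

def pvWitness_map_skills_to_roles : Option (List String) × (List (String × List String)) :=
  (some ["Python", "sql"], [("ML Engineer", ["python", "SQL", "Docker"]), ("Data Analyst", [])])

def Spec_map_skills_to_roles (ai_skills : Option (List String)) (skill_taxonomy : List (String × List String)) (out : List (String × List (String × List String))) : Prop := out = map_skills_to_roles_alt ai_skills skill_taxonomy
instance (ai_skills : Option (List String)) (skill_taxonomy : List (String × List String)) (out : List (String × List (String × List String))) : Decidable (Spec_map_skills_to_roles ai_skills skill_taxonomy out) := by unfold Spec_map_skills_to_roles; infer_instance

-- ===== CLAIM (what is proved, stated in full; the proofs are below) =====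
def Claim_equal_map_skills_to_roles : Prop := ∀ (ai_skills : Option (List String)) (skill_taxonomy : List (String × List String)), Dom_map_skills_to_roles ai_skills skill_taxonomy → Pre_map_skills_to_roles ai_skills skill_taxonomy → Spec_map_skills_to_roles ai_skills skill_taxonomy (map_skills_to_roles ai_skills skill_taxonomy)

-- ===== LEMMAS AND PROOFS =====

-- keys of the flattened pair list all come from the taxonomy's key list
theorem pairs_key_mem {tax : List (String × List String)} {p : String × String}
    (hp : p ∈ tax.flatMap (fun e => e.2.map (fun s => (e.1, s)))) : p.1 ∈ tax.map Prod.fst := by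
  simp only [List.mem_flatMap, List.mem_map] at hp
  obtain ⟨e, he, s, _, rfl⟩ := hp
  exact List.mem_map.2 ⟨e, he, rfl⟩

-- with distinct keys, restricting the flat pair list to one role's key recovers that role's skills
theorem pairs_filter_key (tax : List (String × List String))
    (hnd : (tax.map Prod.fst).Nodup) (rs : String × List String) (hmem : rs ∈ tax) :
    (tax.flatMap (fun e => e.2.map (fun s => (e.1, s)))).filter (fun p => p.1 == rs.1)
      = rs.2.map (fun s => (rs.1, s)) := by
  induction tax with
  | nil => cases hmem
  | cons e t ih =>
    simp only [List.flatMap_cons, List.filter_append]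
    simp only [List.map_cons, List.nodup_cons] at hnd
    rcases List.mem_cons.1 hmem with rfl | hmem'
    · have h1 : (rs.2.map (fun s => (rs.1, s))).filter (fun p => p.1 == rs.1)
          = rs.2.map (fun s => (rs.1, s)) := by
        apply List.filter_eq_self.2
        intro p hp
        simp only [List.mem_map] at hp
        obtain ⟨s, _, rfl⟩ := hp
        simp
      have h2 : (t.flatMap (fun e => e.2.map (fun s => (e.1, s)))).filter (fun p => p.1 == rs.1) = [] := by
        apply List.filter_eq_nil_iff.2
        intro p hp
        have := pairs_key_mem hp
        simp only [beq_iff_eq]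
        intro h
        exact hnd.1 (h ▸ this)
      rw [h1, h2, List.append_nil]
    · have hne : e.1 ≠ rs.1 := by
        intro h
        exact hnd.1 (h ▸ List.mem_map.2 ⟨rs, hmem', rfl⟩)
      have h1 : (e.2.map (fun s => (e.1, s))).filter (fun p => p.1 == rs.1) = [] := by
        apply List.filter_eq_nil_iff.2
        intro p hp
        simp only [List.mem_map] at hp
        obtain ⟨s, _, rfl⟩ := hp
        simpa using hne
      rw [h1, List.nil_append]
      exact ih hnd.2 hmem'

-- the classify loop's bucket for role rs.1 is exactly rs.2 filtered by the test
theorem bucket_getD (tax : List (String × List String)) (P : String → Bool)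
    (hnd : (tax.map Prod.fst).Nodup) (rs : String × List String) (hmem : rs ∈ tax)
    (keep : String × String → Bool) (hkeep : ∀ p, keep p = P p.2) :
    (((tax.flatMap (fun e => e.2.map (fun s => (e.1, s)))).filter keep).foldl
        (fun d p => d.modify p.1 [] (· ++ [p.2])) PySem.Dict.empty).getD rs.1 []
      = rs.2.filter P := by
  rw [PySem.Dict.getD_foldl_modify_append, PySem.Dict.getD_empty, List.nil_append]
  have hcomm : ((tax.flatMap (fun e => e.2.map (fun s => (e.1, s)))).filter keep).filter
      (fun p => p.1 == rs.1)
      = ((tax.flatMap (fun e => e.2.map (fun s => (e.1, s)))).filter (fun p => p.1 == rs.1)).filter keep := by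
    rw [List.filter_comm]
  rw [hcomm, pairs_filter_key tax hnd rs hmem, List.filter_map, List.map_map]
  have h2 : List.filter (keep ∘ fun s => (rs.1, s)) rs.2 = List.filter P rs.2 :=
    List.filter_congr (fun s _ => hkeep (rs.1, s))
  simp [h2]

theorem map_skills_to_roles_eq (ai_skills : Option (List String)) (skill_taxonomy : List (String × List String))
    (hnd : (skill_taxonomy.map Prod.fst).Nodup) :
    map_skills_to_roles ai_skills skill_taxonomy = map_skills_to_roles_alt ai_skills skill_taxonomy := by
  unfold map_skills_to_roles map_skills_to_roles_alt
  rw [PySem.List.foldl_append_singleton_eq_map]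
  dsimp only
  set P : String → Bool := fun s =>
    PySem.Set.contains (PySem.Set.ofList ((ai_skills.getD []).map (fun s => PySem.Str.lower s))) (PySem.Str.lower s) with hP
  set pairs : List (String × String) := skill_taxonomy.flatMap (fun rs => rs.2.map (fun s => (rs.1, s))) with hpairs
  -- the paired classify loop is two independent dict loops
  have hsplit : pairs.foldl
      (fun (st : PySem.Dict String (List String) × PySem.Dict String (List String)) p =>
        if P p.2 then (st.1.modify p.1 [] (· ++ [p.2]), st.2) else (st.1, st.2.modify p.1 [] (· ++ [p.2])))
      (PySem.Dict.empty, PySem.Dict.empty)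
      = (pairs.foldl (fun d p => if P p.2 then d.modify p.1 [] (· ++ [p.2]) else d) PySem.Dict.empty,
         pairs.foldl (fun d p => if P p.2 then d else d.modify p.1 [] (· ++ [p.2])) PySem.Dict.empty) := by
    trans pairs.foldl
        (fun (st : PySem.Dict String (List String) × PySem.Dict String (List String)) (p : String × String) =>
          ((if P p.2 then st.1.modify p.1 [] (· ++ [p.2]) else st.1),
           (if P p.2 then st.2 else st.2.modify p.1 [] (· ++ [p.2]))))
        ((PySem.Dict.empty : PySem.Dict String (List String)), (PySem.Dict.empty : PySem.Dict String (List String)))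
    · apply PySem.List.foldl_congr_mem
      intro st p _
      by_cases h : P p.2 <;> simp [h]
    · exact PySem.List.foldl_prod_mk
        (f := fun (d : PySem.Dict String (List String)) (p : String × String) => if P p.2 then d.modify p.1 [] (· ++ [p.2]) else d)
        (g := fun (d : PySem.Dict String (List String)) (p : String × String) => if P p.2 then d else d.modify p.1 [] (· ++ [p.2])) _ _ _
  rw [hsplit, List.nil_append]
  refine List.map_congr_left (fun rs hmem => ?_)
  rw [PySem.List.foldl_if_eq_foldl_filter (p := fun p : String × String => P p.2)]
  have hflip : pairs.foldl
      (fun d (p : String × String) => if P p.2 then d else d.modify p.1 [] (· ++ [p.2])) PySem.Dict.empty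
      = pairs.foldl
      (fun d (p : String × String) => if !P p.2 then d.modify p.1 [] (· ++ [p.2]) else d) PySem.Dict.empty := by
    apply PySem.List.foldl_congr_mem
    intro d p _
    by_cases h : P p.2 <;> simp [h]
  rw [hflip, PySem.List.foldl_if_eq_foldl_filter (p := fun p : String × String => !P p.2)]
  rw [hpairs, bucket_getD skill_taxonomy P hnd rs hmem _ (fun p => rfl),
      bucket_getD skill_taxonomy (fun s => !P s) hnd rs hmem _ (fun p => rfl)]

-- ===== VERDICT (by name: the statement is the Claim_ definition above) =====
theorem map_skills_to_roles_spec : Claim_equal_map_skills_to_roles := by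
  intro ai tax _ hpre
  exact map_skills_to_roles_eq ai tax hpre
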